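-- pv_equiv track=rewrite | github.com/agustinfranco1/ayed1-2025-tps | TP3/ejercicio_1.py | columnas_palindromas
-- ===== SOURCE A (Python) =====
-- from typing import List
--
-- def columnas_palindromas(matriz: List[List[int]]) -> List[int]:
--     """
--     Devuelve una lista con los indices de columnas que son palindromos.
--
--     Pre: matriz debe ser una lista de listas cuadrada.
--
--     Post: devuelve una lista con las columnas capicuas.
--     """
--     n = len(matriz)
--     resultado: List[int] = []
--
--     for col in range(n):
--         columna = [matriz[f][col] for f in range(n)]
--         if columna == columna[::-1]:
--             resultado.append(col)
--
--     return resultado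
-- ===== SOURCE B (Python) =====
-- from typing import List
--
-- def columnas_palindromas(matriz: List[List[int]]) -> List[int]:
--     n = len(matriz)
--     resultado: List[int] = []
--     for col in range(n):
--         es_palindromo = True
--         for f in range(n // 2):
--             if matriz[f][col] != matriz[n - 1 - f][col]:
--                 es_palindromo = False
--                 break
--         if es_palindromo:
--             resultado.append(col)
--     return resultado
-- ===== Notes on version B (the rewrite author's own statement) =====
-- stated objective: alternative
-- what changed: Instead of materialising each column and comparing it with a reversed copy, B runs an inward two-pointer scan over half of each column, maintaining a boolean flag and breaking at the first mismatch.
import Mathlib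
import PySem

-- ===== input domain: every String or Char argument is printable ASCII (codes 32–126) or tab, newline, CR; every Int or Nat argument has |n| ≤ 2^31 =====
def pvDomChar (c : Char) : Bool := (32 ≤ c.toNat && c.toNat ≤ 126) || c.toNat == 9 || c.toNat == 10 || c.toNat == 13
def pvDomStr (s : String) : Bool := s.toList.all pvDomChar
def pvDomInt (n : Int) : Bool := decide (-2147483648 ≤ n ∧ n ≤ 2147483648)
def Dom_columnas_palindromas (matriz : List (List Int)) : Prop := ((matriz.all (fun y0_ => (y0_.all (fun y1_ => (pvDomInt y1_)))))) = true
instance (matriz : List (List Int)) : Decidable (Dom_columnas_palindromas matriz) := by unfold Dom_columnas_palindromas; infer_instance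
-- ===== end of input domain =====

-- B replaces A's column-plus-reversed-copy comparison by an inward two-pointer half scan
-- with an early break; same asymptotic cost, different decomposition.

-- matriz[f][col] — in range under Pre_ (pyGetD is Python-exact there)
def pvCell (matriz : List (List Int)) (f col : Int) : Int :=
  PySem.List.pyGetD (PySem.List.pyGetD matriz f []) col 0

-- ===== PORT A =====
def columnas_palindromas (matriz : List (List Int)) : List Int :=
  let n : Int := (matriz.length : Int)
  (PySem.List.pyRange 0 n 1).foldl (fun resultado col =>
    let columna := (PySem.List.pyRange 0 n 1).map (fun f => pvCell matriz f col)
    -- columna[::-1] : PySem.List.slice? … (-1) (never none for step -1)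
    if columna = (PySem.List.slice? columna none none (-1)).getD [] then
      resultado ++ [col]
    else resultado) []

-- ===== PORT B =====
-- inner loop 'for f in range(n // 2): … break' — fuel = remaining iterations, early return false
def pvHalfScan (matriz : List (List Int)) (n col : Int) : Nat → Int → Bool
  | 0, _ => true
  | Nat.succ k, f =>
    if pvCell matriz f col ≠ pvCell matriz (n - 1 - f) col then false
    else pvHalfScan matriz n col k (f + 1)

def columnas_palindromas_alt (matriz : List (List Int)) : List Int :=
  let n : Int := (matriz.length : Int)
  (PySem.List.pyRange 0 n 1).foldl (fun resultado col =>
    if pvHalfScan matriz n col (PySem.Int.floordiv n 2).toNat 0 then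
      resultado ++ [col]
    else resultado) []

-- ===== PRECONDITION & SPEC =====
-- Pre_ excludes exactly the inputs where A raises IndexError: a row shorter than len(matriz).
def Pre_columnas_palindromas (matriz : List (List Int)) : Prop :=
  ∀ row ∈ matriz, matriz.length ≤ row.length
instance (matriz : List (List Int)) : Decidable (Pre_columnas_palindromas matriz) := by
  unfold Pre_columnas_palindromas; infer_instance

def pvWitness_columnas_palindromas : List (List Int) := [[1, 2, 1], [4, 5, 6], [1, 2, 1]]

def Spec_columnas_palindromas (matriz : List (List Int)) (out : List Int) : Prop := out = columnas_palindromas_alt matriz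
instance (matriz : List (List Int)) (out : List Int) : Decidable (Spec_columnas_palindromas matriz out) := by unfold Spec_columnas_palindromas; infer_instance

-- ===== CLAIM (what is proved, stated in full; the proofs are below) =====
def Claim_equal_columnas_palindromas : Prop := ∀ (matriz : List (List Int)), Dom_columnas_palindromas matriz → Pre_columnas_palindromas matriz → Spec_columnas_palindromas matriz (columnas_palindromas matriz)

-- ===== LEMMAS AND PROOFS =====

-- B's inner loop returns true iff all compared pairs agree
lemma pvHalfScan_iff (matriz : List (List Int)) (n col : Int) (k : Nat) (f : Int) :
    pvHalfScan matriz n col k f = true ↔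
      ∀ j : Int, f ≤ j → j < f + k → pvCell matriz j col = pvCell matriz (n - 1 - j) col := by
  induction k generalizing f with
  | zero => simp [pvHalfScan]; intro j h1 h2; omega
  | succ k ih =>
    by_cases h : pvCell matriz f col = pvCell matriz (n - 1 - f) col
    · simp only [pvHalfScan, h, ne_eq, not_true_eq_false, if_false, ih]
      constructor
      · intro hall j h1 h2
        rcases eq_or_lt_of_le h1 with rfl | hlt
        · exact h
        · exact hall j (by omega) (by omega)
      · intro hall j h1 h2
        exact hall j (by omega) (by omega)
    · simp only [pvHalfScan, h, ne_eq, not_false_eq_true, if_true]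
      constructor
      · intro hfalse; cases hfalse
      · intro hall
        exact absurd (hall f le_rfl (by omega)) h

-- A's palindrome test on the column equals B's half-scan
lemma pal_iff_halfScan (matriz : List (List Int)) (col : Int) :
    ((PySem.List.pyRange 0 (matriz.length : Int) 1).map (fun f => pvCell matriz f col)
      = ((PySem.List.pyRange 0 (matriz.length : Int) 1).map (fun f => pvCell matriz f col)).reverse)
      ↔ pvHalfScan matriz (matriz.length : Int) col
          ((PySem.Int.floordiv (matriz.length : Int) 2).toNat) 0 = true := by
  set N := matriz.length with hN
  have hfuel : (PySem.Int.floordiv (N : Int) 2).toNat = N / 2 := by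
    rw [show ((2 : Int) = ((2 : Nat) : Int)) from rfl, PySem.Int.floordiv_natCast]
    exact Int.toNat_natCast _
  rw [hfuel, pvHalfScan_iff]
  set g : Int → Int := fun f => pvCell matriz f col with hg
  set columna := (PySem.List.pyRange 0 (N : Int) 1).map g with hcol
  have hlen : columna.length = N := by
    simp [hcol, PySem.List.length_pyRange_one]
  constructor
  · -- palindrome ⇒ half pairs agree
    intro hpal j h0 hj
    have hjN : j.toNat < N := by omega
    have h1 : columna[j.toNat] = g j := by
      simp [hcol, PySem.List.getElem_pyRange_one]
      congr 1; omega
    have h2 := List.getElem_of_eq hpal (show j.toNat < columna.length by omega)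
    rw [List.getElem_reverse] at h2
    have h3 : columna[columna.length - 1 - j.toNat]'(by omega) = g ((N : Int) - 1 - j) := by
      simp [hcol, PySem.List.getElem_pyRange_one]
      congr 1
      have : (columna.length - 1 - j.toNat : Nat) = N - 1 - j.toNat := by omega
      omega
    rw [h3] at h2
    rw [h1] at h2
    exact h2
  · -- half pairs agree ⇒ palindrome
    intro hall
    have key : ∀ i : Nat, i < N → g (i : Int) = g ((N : Int) - 1 - i) := by
      intro i hi
      by_cases hlo : i < N / 2
      · exact hall i (by omega) (by push_cast; omega)
      · by_cases hmid : 2 * i = N - 1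
        · congr 1; omega
        · have hj : N - 1 - i < N / 2 := by omega
          have := hall ((N - 1 - i : Nat) : Int) (by omega) (by push_cast; omega)
          have harg : (N : Int) - 1 - ((N - 1 - i : Nat) : Int) = (i : Int) := by omega
          rw [harg] at this
          have harg2 : ((N - 1 - i : Nat) : Int) = (N : Int) - 1 - (i : Int) := by omega
          rw [harg2] at this
          exact this.symm
    apply List.ext_getElem (by simp)
    intro i h1 h2
    rw [List.getElem_reverse]
    have e1 : columna[i] = g (i : Int) := by
      simp [hcol, PySem.List.getElem_pyRange_one]
    have e2 : columna[columna.length - 1 - i]'(by omega) = g ((N : Int) - 1 - i) := by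
      simp [hcol, PySem.List.getElem_pyRange_one]
      congr 1
      omega
    rw [e1, e2]
    exact key i (by omega)

-- ===== VERDICT (by name: the statement is the Claim_ definition above) =====
theorem columnas_palindromas_spec : Claim_equal_columnas_palindromas := by
  intro matriz _dom _pre
  unfold Spec_columnas_palindromas
  simp only [columnas_palindromas, columnas_palindromas_alt]
  congr 1
  funext resultado col
  rw [PySem.List.slice?_none_none_neg_one]
  simp only [Option.getD_some]
  by_cases h : (PySem.List.pyRange 0 (matriz.length : Int) 1).map (fun f => pvCell matriz f col)
      = ((PySem.List.pyRange 0 (matriz.length : Int) 1).map (fun f => pvCell matriz f col)).reverse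
  · rw [if_pos h, if_pos ((pal_iff_halfScan matriz col).mp h)]
  · rw [if_neg h, if_neg (by rw [← pal_iff_halfScan matriz col]; exact h)]
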